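-- pv_equiv track=rewrite | github.com/ikeg225/swe | listings/listing.py | swe_position
-- ===== SOURCE A (Python) =====
-- def swe_position(title):
--     intern_check, field_check = False, False
--     intern_keywords = set(['intern', 'internship'])
--     field_keywords = set(['software', 'data', 'trading', 'trade', 'web', 'development', 'python', 'java', 'javascript', 'ruby',
--     'user', 'interface', 'quantitative', 'full', 'stack', 'front', 'end', 'back', 'react', 'swift', 'ios', 'engineer',
--     'engineering', 'technology', 'android', 'analyst', 'c++', 'c#', 'tech', 'ai', 'mechanical'])
--     for word in title:
--         if word in field_keywords:
--             field_check = True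
--         elif word in intern_keywords:
--             intern_check = True
--         if intern_check and field_check:
--             return True
--     return False
-- ===== SOURCE B (Python) =====
-- def swe_position(title):
--     intern_keywords = 'intern internship'.split()
--     field_keywords = ('software data trading trade web development python java javascript ruby '
--                       'user interface quantitative full stack front end back react swift ios engineer '
--                       'engineering technology android analyst c++ c# tech ai mechanical').split()
--     return any(w in intern_keywords for w in title) and any(w in field_keywords for w in title)
-- ===== Notes on version B (the rewrite author's own statement) =====
-- stated objective: idiomatic
-- what changed: Replaces the per-word loop maintaining two flags with an early return by two staged any() passes over the title (keyword lists built by splitting whitespace-separated literals); correct because the keyword sets are disjoint so only the existence of one word from each category matters.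
import Mathlib
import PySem

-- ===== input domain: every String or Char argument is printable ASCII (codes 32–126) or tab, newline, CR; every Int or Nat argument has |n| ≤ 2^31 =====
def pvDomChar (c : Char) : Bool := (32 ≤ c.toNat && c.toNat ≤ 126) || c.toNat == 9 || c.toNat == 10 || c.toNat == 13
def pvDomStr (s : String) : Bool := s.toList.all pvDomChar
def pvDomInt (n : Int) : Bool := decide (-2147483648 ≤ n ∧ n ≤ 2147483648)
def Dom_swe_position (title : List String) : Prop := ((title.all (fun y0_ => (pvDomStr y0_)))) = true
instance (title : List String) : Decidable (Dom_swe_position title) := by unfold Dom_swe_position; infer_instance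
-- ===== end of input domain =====

-- B replaces A's single flag-loop with early return by two staged any-passes over keyword
-- lists built from whitespace-split literals (idiomatic); equivalence proved below.


-- ===== PORT A =====
def internKW : PySem.Set String := PySem.Set.ofList ["intern", "internship"]

def fieldKW : PySem.Set String := PySem.Set.ofList ["software", "data", "trading", "trade", "web", "development",
  "python", "java", "javascript", "ruby", "user", "interface", "quantitative", "full", "stack", "front", "end",
  "back", "react", "swift", "ios", "engineer", "engineering", "technology", "android", "analyst", "c++", "c#",
  "tech", "ai", "mechanical"]

-- the for-loop over title with the two flags and the early return
def sweLoop : List String → Bool → Bool → Bool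
  | [], _, _ => false
  | w :: ws, intern_check, field_check =>
    let field_check' := if PySem.Set.contains fieldKW w then true else field_check
    let intern_check' := if PySem.Set.contains fieldKW w then intern_check
                         else if PySem.Set.contains internKW w then true else intern_check
    if intern_check' && field_check' then true else sweLoop ws intern_check' field_check'

def swe_position (title : List String) : Bool := sweLoop title false false

-- ===== PORT B =====
def internWords : List String := PySem.Str.split₀ "intern internship"

def fieldWords : List String := PySem.Str.split₀
  ("software data trading trade web development python java javascript ruby " ++
   "user interface quantitative full stack front end back react swift ios engineer " ++
   "engineering technology android analyst c++ c# tech ai mechanical")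

def swe_position_alt (title : List String) : Bool :=
  (title.any (fun w => internWords.contains w)) && (title.any (fun w => fieldWords.contains w))

-- ===== PRECONDITION & SPEC =====
def Spec_swe_position (title : List String) (out : Bool) : Prop := out = swe_position_alt title
instance (title : List String) (out : Bool) : Decidable (Spec_swe_position title out) := by unfold Spec_swe_position; infer_instance

-- ===== CLAIM (what is proved, stated in full; the proofs are below) =====
def Claim_equal_swe_position : Prop := ∀ (title : List String), Dom_swe_position title → Spec_swe_position title (swe_position title)

-- ===== LEMMAS AND PROOFS =====

-- the split literals evaluate to the very keyword lists A uses
theorem internWords_eq : internWords = ["intern", "internship"] := by decide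

set_option maxRecDepth 10000 in
theorem fieldWords_eq : fieldWords = ["software", "data", "trading", "trade", "web", "development",
    "python", "java", "javascript", "ruby", "user", "interface", "quantitative", "full", "stack", "front", "end",
    "back", "react", "swift", "ios", "engineer", "engineering", "technology", "android", "analyst", "c++", "c#",
    "tech", "ai", "mechanical"] := by decide

-- the two keyword sets are disjoint
theorem kw_disjoint (w : String) (h : w ∈ internKW) : w ∉ fieldKW := by
  have : w = "intern" ∨ w = "internship" := by
    simpa [internKW, PySem.Set.ofList] using h
  rcases this with rfl | rfl <;> decide

theorem sweLoop_eq (ws : List String) : ∀ (ic fc : Bool), ¬(ic = true ∧ fc = true) →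
    sweLoop ws ic fc = ((ic || ws.any (fun w => decide (w ∈ internKW))) &&
                        (fc || ws.any (fun w => decide (w ∈ fieldKW)))) := by
  induction ws with
  | nil => intro ic fc h; cases ic <;> cases fc <;> simp_all [sweLoop]
  | cons w ws ih =>
    intro ic fc h
    by_cases hf : w ∈ fieldKW <;> by_cases hi : w ∈ internKW
    · exact absurd hf (kw_disjoint w hi)
    all_goals
      cases ic <;> cases fc <;>
        first
          | exact absurd ⟨rfl, rfl⟩ h
          | simp [sweLoop, hf, hi, ih]

-- ===== VERDICT (by name: the statement is the Claim_ definition above) =====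
theorem swe_position_spec : Claim_equal_swe_position := by
  intro title _
  unfold Spec_swe_position swe_position swe_position_alt
  rw [sweLoop_eq title false false (by simp), internWords_eq, fieldWords_eq]
  simp [internKW, fieldKW, PySem.Set.mem_ofList]
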